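-- pv_equiv track=rewrite | github.com/NandaKishoreYadav/Flower-Classification | app.py | flower
-- ===== SOURCE A (Python) =====
-- def flower(result):
--     arr={'daisy': 0, 'dandelion': 1, 'rose': 2, 'sunflower': 3, 'tulip': 4}
--     d={}
--     for i in arr:
--         d[arr[i]]=i
--     maxi=0
--     ans=''
--     for i in range(len(result[0])):
--         if maxi<result[0][i]:
--             ans = d[i]
--             maxi=result[0][i]
--     return ans
-- ===== SOURCE B (Python) =====
-- def flower(result):
--     names = ['daisy', 'dandelion', 'rose', 'sunflower', 'tulip']
--     row = result[0]
--     for i, v in enumerate(row):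
--         if v > 0 and all(w <= v for w in row):
--             return names[i]
--     return ''
-- ===== Notes on version B (the rewrite author's own statement) =====
-- stated objective: alternative
-- what changed: Replaces A's single fused running-max tracking loop (with a dict built by inverting a name->index dict) by a stateless quadratic candidate search: return the name of the first element that is a positive maximum of the whole row (each candidate rechecks the entire row), with a plain name list instead of the dicts.
-- outside the precondition, e.g. on flower([]): A raises IndexError, B raises IndexError; on flower([[0, 0, 0, 0, 0, 7]]): A raises KeyError, B raises IndexError
import Mathlib
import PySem

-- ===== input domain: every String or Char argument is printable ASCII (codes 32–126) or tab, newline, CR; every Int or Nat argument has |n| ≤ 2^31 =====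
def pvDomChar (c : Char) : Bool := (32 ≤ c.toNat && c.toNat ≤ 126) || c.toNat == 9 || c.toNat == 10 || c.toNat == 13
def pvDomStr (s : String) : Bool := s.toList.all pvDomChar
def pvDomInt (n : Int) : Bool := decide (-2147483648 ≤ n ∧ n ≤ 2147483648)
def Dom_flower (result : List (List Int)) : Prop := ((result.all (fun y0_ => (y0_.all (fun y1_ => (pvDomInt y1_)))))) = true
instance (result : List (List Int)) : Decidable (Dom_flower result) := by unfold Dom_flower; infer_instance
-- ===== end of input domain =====

-- B replaces A's fused running-max tracking loop (and its inverted dict) by a stateless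
-- quadratic candidate search: the name of the first element that is a positive maximum
-- of the whole row (each candidate rechecks the full row against a plain name list).


-- ===== PORT A =====
def flower (result : List (List Int)) : String :=
  let arr : PySem.Dict String Int :=
    PySem.Dict.ofList [("daisy", 0), ("dandelion", 1), ("rose", 2), ("sunflower", 3), ("tulip", 4)]
  -- for i in arr: d[arr[i]] = i
  let d : PySem.Dict Int String :=
    (PySem.Dict.keys arr).foldl
      (fun d i => PySem.Dict.insert d (PySem.Dict.getD arr i 0) i) PySem.Dict.empty
  -- result[0]: IndexError on result = [] is excluded by Pre_flower
  let row : List Int := (PySem.List.pyGet? result 0).getD []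
  -- for i in range(len(result[0])): … d[i] — KeyError (i ∉ d) is excluded by Pre_flower
  ((PySem.List.pyRange 0 (row.length : Int) 1).foldl
    (fun (st : Int × String) i =>
      let v := (PySem.List.pyGet? row i).getD 0
      if st.1 < v then (v, PySem.Dict.getD d i "") else st)
    (0, "")).2

-- ===== PORT B =====
-- the 'for i, v in enumerate(row): if …: return names[i]' loop, as structural recursion
def flowerAltGo (names : List String) (row : List Int) : List (Int × Int) → String
  | [] => ""
  | (i, v) :: rest =>
      if (decide (0 < v) && row.all (fun w => decide (w ≤ v))) = true
      then (PySem.List.pyGet? names i).getD ""   -- names[i]: IndexError (i ≥ 5) is excluded by Pre_flower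
      else flowerAltGo names row rest

def flower_alt (result : List (List Int)) : String :=
  let names : List String := ["daisy", "dandelion", "rose", "sunflower", "tulip"]
  -- result[0]: IndexError on result = [] is excluded by Pre_flower
  let row : List Int := (PySem.List.pyGet? result 0).getD []
  flowerAltGo names row (PySem.List.enumerate row 0)

-- ===== PRECONDITION & SPEC =====
-- Pre_ excludes exactly the inputs where A raises: result = [] (IndexError on result[0]),
-- and rows whose running max first strictly improves at an index ≥ 5 (KeyError d[i]).
def Pre_flower (result : List (List Int)) : Prop :=
  result ≠ [] ∧ ∀ i ∈ List.range result.headI.length, 5 ≤ i →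
    result.headI.getD i 0 ≤ (result.headI.take i).foldl max 0
instance (result : List (List Int)) : Decidable (Pre_flower result) := by
  unfold Pre_flower; infer_instance

def pvWitness_flower : List (List Int) := [[1, 5, 2]]

def Spec_flower (result : List (List Int)) (out : String) : Prop := out = flower_alt result
instance (result : List (List Int)) (out : String) : Decidable (Spec_flower result out) := by
  unfold Spec_flower; infer_instance

-- ===== CLAIM (what is proved, stated in full; the proofs are below) =====
def Claim_equal_flower : Prop :=
  ∀ (result : List (List Int)), Dom_flower result → Pre_flower result →
    Spec_flower result (flower result)


-- ===== LEMMAS AND PROOFS =====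

-- the dict A builds (d in A's code), and the name it assigns to index k
def pvArr : PySem.Dict String Int :=
  PySem.Dict.ofList [("daisy", 0), ("dandelion", 1), ("rose", 2), ("sunflower", 3), ("tulip", 4)]
def pvD : PySem.Dict Int String :=
  (PySem.Dict.keys pvArr).foldl
    (fun d i => PySem.Dict.insert d (PySem.Dict.getD pvArr i 0) i) PySem.Dict.empty
def pvName (k : Nat) : String := PySem.Dict.getD pvD (k : Int) ""

theorem flower_cons (row : List Int) (rest : List (List Int)) :
    flower (row :: rest) =
      ((List.range row.length).foldl
        (fun (st : Int × String) k =>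
          let v := row.getD k 0
          if st.1 < v then (v, pvName k) else st) (0, "")).2 := by
  have h0 : (PySem.List.pyGet? (row :: rest) 0).getD [] = row := by
    simp [PySem.List.pyGet?, PySem.List.pyIdx?]
  simp only [flower, h0]
  rw [PySem.List.pyRange_zero_natCast, List.foldl_map]
  simp [pvName, pvD, pvArr, PySem.List.pyGet?_natCast, List.getD_eq_getElem?_getD]

theorem foldl_max_le {l : List Int} {a c : Int} (ha : a ≤ c) (hl : ∀ y ∈ l, y ≤ c) :
    l.foldl max a ≤ c := by
  induction l generalizing a with
  | nil => exact ha
  | cons x t ih =>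
      exact ih (max_le ha (hl x (by simp))) (fun y hy => hl y (by simp [hy]))

theorem foldl_max_eq_or_mem (l : List Int) (a : Int) :
    l.foldl max a = a ∨ l.foldl max a ∈ l := by
  induction l generalizing a with
  | nil => exact Or.inl rfl
  | cons x t ih =>
      rcases ih (max a x) with h | h
      · by_cases hxa : x ≤ a
        · exact Or.inl (by rw [List.foldl_cons, h]; omega)
        · exact Or.inr (by rw [List.foldl_cons, h]; simp; omega)
      · exact Or.inr (by simp [h])

theorem idxOf?_append_self {v : Int} {l : List Int} (hv : v ∉ l) :
    List.idxOf? v (l ++ [v]) = some l.length := by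
  rw [List.idxOf?_eq_some_iff]
  refine ⟨by simp, by simp, ?_⟩
  intro j hj
  have hjl : j < l.length := hj
  rw [List.getElem_append_left hjl]
  exact fun h => hv (h ▸ List.getElem_mem hjl)

theorem idxOf?_append_of_mem {v : Int} {l l' : List Int} (hv : v ∈ l) :
    List.idxOf? v (l ++ l') = List.idxOf? v l := by
  cases h : List.idxOf? v l with
  | none => exact absurd hv (List.idxOf?_eq_none_iff.mp h)
  | some j =>
      rw [List.idxOf?_eq_some_iff] at h
      obtain ⟨hj, hval, hmin⟩ := h
      rw [List.idxOf?_eq_some_iff]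
      have hj' : j < (l ++ l').length := by simp; omega
      refine ⟨hj', by rw [List.getElem_append_left hj]; exact hval, ?_⟩
      intro i hi
      have hil : i < l.length := lt_trans hi hj
      rw [List.getElem_append_left hil]
      exact hmin i hi

-- the invariant of A's loop: after n steps the state is (max(0, max of take n), name of
-- the first argmax of take n if that max is positive, else "")
theorem loop_inv (f : Nat → String) (row : List Int) (n : Nat) (hn : n ≤ row.length) :
    (List.range n).foldl
        (fun (st : Int × String) k =>
          let v := row.getD k 0
          if st.1 < v then (v, f k) else st) (0, "")
      = ((row.take n).foldl max 0,
         if 0 < (row.take n).foldl max 0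
           then f ((PySem.List.index? (row.take n) ((row.take n).foldl max 0)).getD 0)
           else "") := by
  induction n with
  | zero => simp
  | succ n ih =>
      have hn' : n ≤ row.length := le_of_lt hn
      have hnl : n < row.length := hn
      rw [List.range_succ, List.foldl_append, ih hn']
      have htake : row.take (n + 1) = row.take n ++ [row[n]] := by
        rw [List.take_add_one]; simp [List.getElem?_eq_getElem hnl]
      set M := (row.take n).foldl max 0 with hM
      have hM0 : 0 ≤ M := (PySem.List.le_foldl_max (row.take n) 0).1
      have hMmax : ∀ y ∈ row.take n, y ≤ M :=
        (PySem.List.le_foldl_max (row.take n) 0).2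
      have hgd : row.getD n 0 = row[n] := by
        simp [List.getD_eq_getElem?_getD, List.getElem?_eq_getElem hnl]
      have hfold : (row.take (n + 1)).foldl max 0 = max M (row[n]) := by
        rw [htake, List.foldl_append]; rfl
      simp only [List.foldl_cons, List.foldl_nil, hgd]
      by_cases hlt : M < row[n]
      · have hmax : max M (row[n]) = row[n] := by omega
        have hnotmem : row[n] ∉ row.take n := fun hmem => by
          have := hMmax _ hmem; omega
        have hidx : PySem.List.index? (row.take (n + 1)) (row[n]) = some n := by
          simp only [PySem.List.index?, htake]
          rw [idxOf?_append_self hnotmem]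
          simp [List.length_take, Nat.min_eq_left hn']
        rw [if_pos hlt, hfold, hmax, hidx]
        simp; omega
      · rw [not_lt] at hlt
        have hmax : max M (row[n]) = M := by omega
        rw [if_neg (by omega), hfold, hmax]
        by_cases hpos : 0 < M
        · have hmem : M ∈ row.take n := by
            rcases foldl_max_eq_or_mem (row.take n) 0 with he | hm
            · rw [← hM] at he; omega
            · exact hM ▸ hm
          have : PySem.List.index? (row.take (n + 1)) M
              = PySem.List.index? (row.take n) M := by
            simp only [PySem.List.index?, htake]
            exact idxOf?_append_of_mem hmem
          rw [this]
        · simp [hpos]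

-- B's loop finds nothing when no candidate in the suffix is a positive row-maximum
theorem go_none (names : List String) (row : List Int) (l : List (Int × Int))
    (h : ∀ p ∈ l, ¬ (0 < p.2 ∧ ∀ w ∈ row, w ≤ p.2)) :
    flowerAltGo names row l = "" := by
  induction l with
  | nil => rfl
  | cons p t ih =>
      obtain ⟨i, v⟩ := p
      have hc : ¬ (0 < v ∧ ∀ w ∈ row, w ≤ v) := h (i, v) (by simp)
      rw [flowerAltGo]
      rw [if_neg (by simpa using hc)]
      exact ih (fun q hq => h q (by simp [hq]))

-- B's loop on the enumeration of t (offset s): with m a positive maximum of row,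
-- every element of t bounded by row's max and m first occurring at index j in t,
-- the loop answers names[s + j]
theorem go_finds (names : List String) (row : List Int) (m : Int)
    (hm0 : 0 < m) (hmem : m ∈ row) (hmax : ∀ w ∈ row, w ≤ m) :
    ∀ (t : List Int) (s : Int) (j : Nat), (∀ w ∈ t, w ∈ row) →
      List.idxOf? m t = some j →
      flowerAltGo names row (PySem.List.enumerate t s) = (PySem.List.pyGet? names (s + j)).getD "" := by
  intro t
  induction t with
  | nil => intro s j _ hj; simp at hj
  | cons x t ih =>
      intro s j hsub hj
      rw [PySem.List.enumerate_cons, flowerAltGo]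
      by_cases hx : x = m
      · subst hx
        rw [if_pos (by simp; exact ⟨hm0, hmax⟩)]
        have : List.idxOf? x (x :: t) = some 0 := by simp [List.idxOf?_cons]
        rw [this] at hj
        simp at hj
        subst hj
        simp
      · have hxr : x ∈ row := hsub x (by simp)
        have hcond : ¬ ((decide (0 < x) && row.all fun w => decide (w ≤ x)) = true) := by
          intro hc
          simp only [Bool.and_eq_true, decide_eq_true_eq, List.all_eq_true] at hc
          obtain ⟨_, hall⟩ := hc
          have h1 : m ≤ x := by simpa using hall m hmem
          exact hx (le_antisymm (hmax x hxr) h1)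
        rw [if_neg hcond]
        rw [List.idxOf?_cons] at hj
        rw [if_neg (by simpa using fun h => hx (by simpa using h))] at hj
        cases hj' : List.idxOf? m t with
        | none => rw [hj'] at hj; simp at hj
        | some j' =>
            rw [hj'] at hj
            simp at hj
            have hji : j = j' + 1 := by omega
            subst hji
            rw [ih (s + 1) j' (fun w hw => hsub w (by simp [hw])) hj']
            have harg : (s + ((j' + 1 : Nat) : Int)) = s + 1 + (j' : Int) := by omega
            rw [harg]

-- ===== VERDICT (by name: the statement is the Claim_ definition above) =====
theorem flower_spec : Claim_equal_flower := by
  intro result _hdom hpre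
  obtain ⟨hne, hP⟩ := hpre
  unfold Spec_flower
  match result with
  | [] => exact absurd rfl hne
  | row :: rest =>
    simp only [List.headI] at hP
    have h0 : (PySem.List.pyGet? (row :: rest) 0).getD [] = row := by
      simp [PySem.List.pyGet?, PySem.List.pyIdx?]
    cases row with
    | nil =>
        rw [flower_cons]
        simp [flower_alt, PySem.List.pyGet?, PySem.List.pyIdx?, flowerAltGo]
    | cons x t =>
      set row : List Int := x :: t with hrow
      rw [flower_cons, loop_inv pvName row row.length le_rfl, List.take_length]
      set M := row.foldl max 0 with hMdef
      have hM0 : 0 ≤ M := (PySem.List.le_foldl_max row 0).1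
      obtain ⟨m, hm⟩ : ∃ m, PySem.List.max? row id = some m := by
        cases h : PySem.List.max? row id with
        | none => exact absurd ((PySem.List.max?_eq_none_iff _ _).mp h) (by simp [hrow])
        | some m => exact ⟨m, rfl⟩
      have hmem : m ∈ row := PySem.List.max?_mem hm
      have hb : ∀ y ∈ row, y ≤ m := fun y hy => PySem.List.max?_isMax hm y hy
      have hMm : M = max 0 m := by
        apply le_antisymm
        · exact foldl_max_le (le_max_left 0 m)
            (fun y hy => le_trans (hb y hy) (le_max_right 0 m))
        · exact max_le hM0 ((PySem.List.le_foldl_max row 0).2 m hmem)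
      simp only [flower_alt, h0]
      by_cases hm0 : m ≤ 0
      · rw [if_neg (by omega)]
        refine (go_none _ row _ ?_).symm
        rintro ⟨i, v⟩ hp ⟨hv0, hall⟩
        have hvr : v ∈ row := by
          rw [PySem.List.mem_enumerate_iff] at hp
          obtain ⟨k, hk, he⟩ := hp
          have : v = row[k] := by simpa using congrArg Prod.snd he
          exact this ▸ List.getElem_mem hk
        have h1 := hall m hmem
        have h2 := hb v hvr
        omega
      · rw [not_le] at hm0
        cases hj : List.idxOf? m row with
        | none => exact absurd hmem (List.idxOf?_eq_none_iff.mp hj)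
        | some j =>
          obtain ⟨hjl, hjval, hjmin⟩ := List.idxOf?_eq_some_iff.mp hj
          have hj5 : j < 5 := by
            by_contra h5
            rw [not_lt] at h5
            have hPj := hP j (List.mem_range.mpr hjl) h5
            have hgd : row.getD j 0 = m := by
              simp [List.getD_eq_getElem?_getD, List.getElem?_eq_getElem hjl, hjval]
            rw [hgd] at hPj
            have hlt : (row.take j).foldl max 0 < m := by
              rcases foldl_max_eq_or_mem (row.take j) 0 with he | hmem2
              · omega
              · obtain ⟨i, hi, hie⟩ := List.mem_iff_getElem.mp hmem2
                have hij : i < j := lt_of_lt_of_le hi (by simp [List.length_take])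
                have hti : (row.take j)[i] = row[i] := List.getElem_take
                rw [hti] at hie
                have hne' : row[i] ≠ m := hjmin i hij
                have hle : row[i] ≤ m := hb _ (List.getElem_mem _)
                omega
            omega
          have hidx : PySem.List.index? row m = some j := by
            simpa [PySem.List.index?] using hj
          rw [if_pos (by omega)]
          have hMeq : M = m := by omega
          rw [hMeq, hidx]
          simp only [Option.getD_some]
          rw [go_finds _ row m hm0 hmem hb row 0 j (fun w hw => hw) hj]
          rw [zero_add]
          interval_cases j <;> decide
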